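-- pv_equiv track=rewrite | github.com/MADAO81/Codewars_tasks | 6 kyu/Esolang Interpreters number one 6 kyu.py | my_first_interpreter
-- ===== SOURCE A (Python) =====
-- def my_first_interpreter(code):
--     memory, output = 0, ""
--
--     for command in code:
--         if   command == "+":
--           memory += 1
--         elif command == ".":
--           output += chr(memory % 256)
--
--     return output
-- ===== SOURCE B (Python) =====
-- def my_first_interpreter(code):
--     memory = 0
--     out = []
--     for seg in code.split('.')[:-1]:
--         memory += seg.count('+')
--         out.append(chr(memory % 256))
--     return ''.join(out)
-- ===== Notes on version B (the rewrite author's own statement) =====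
-- stated objective: faster
-- what changed: Replaced the per-character scan with per-symbol branches by splitting the code on the output delimiter and, for each segment before the last, adding that segment's plus-count to memory and emitting chr(memory % 256).
import Mathlib
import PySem

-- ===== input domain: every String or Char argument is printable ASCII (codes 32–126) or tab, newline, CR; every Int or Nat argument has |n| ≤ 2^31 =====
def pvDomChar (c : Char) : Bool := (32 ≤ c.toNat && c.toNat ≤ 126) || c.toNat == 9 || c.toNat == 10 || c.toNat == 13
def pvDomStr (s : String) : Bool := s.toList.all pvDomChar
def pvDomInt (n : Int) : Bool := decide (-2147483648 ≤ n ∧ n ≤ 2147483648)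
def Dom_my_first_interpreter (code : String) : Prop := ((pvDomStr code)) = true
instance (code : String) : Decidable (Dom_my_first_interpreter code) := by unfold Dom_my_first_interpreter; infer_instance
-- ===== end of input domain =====

-- B replaces A's per-character scan by a split of the code on '.' with an aggregated
-- '+'-count per segment (objective: a different decomposition; measurably faster in Python).


-- ===== PORT A =====
-- chr(memory % 256) is ported by hand as Char.ofNat (… ).toNat: exact, since 0 ≤ m % 256 < 256
-- is always a valid code point.
def my_first_interpreter (code : String) : String :=
  let r := code.toList.foldl
    (fun (st : Int × List Char) command =>
      if command = '+' then (st.1 + 1, st.2)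
      else if command = '.' then (st.1, st.2 ++ [Char.ofNat (PySem.Int.mod st.1 256).toNat])
      else st) ((0 : Int), ([] : List Char))
  String.mk r.2

-- ===== PORT B =====
-- segs = code.split('.')[:-1]; for each segment: memory += seg.count('+'), emit chr(memory % 256);
-- return ''.join(out).
def my_first_interpreter_alt (code : String) : String :=
  let segs := PySem.List.slice (PySem.Chars.splitOn code.toList ['.']) none (some (-1))
  let r := segs.foldl
    (fun (st : Int × List (List Char)) seg =>
      let m := st.1 + (PySem.Chars.count seg ['+'] : Int)
      (m, st.2 ++ [[Char.ofNat (PySem.Int.mod m 256).toNat]]))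
    ((0 : Int), ([] : List (List Char)))
  String.mk (PySem.Chars.join [] r.2)

-- ===== PRECONDITION & SPEC =====
def Spec_my_first_interpreter (code : String) (out : String) : Prop := out = my_first_interpreter_alt code
instance (code : String) (out : String) : Decidable (Spec_my_first_interpreter code out) := by unfold Spec_my_first_interpreter; infer_instance

-- ===== CLAIM (what is proved, stated in full; the proofs are below) =====
def Claim_equal_my_first_interpreter : Prop := ∀ (code : String), Dom_my_first_interpreter code → Spec_my_first_interpreter code (my_first_interpreter code)

-- ===== LEMMAS AND PROOFS =====

def mapHead (f : List Char → List Char) : List (List Char) → List (List Char)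
  | [] => []
  | x :: xs => f x :: xs

def split1 (s : Char) : List Char → List (List Char)
  | [] => [[]]
  | c :: t => if c = s then [] :: split1 s t else mapHead (c :: ·) (split1 s t)

theorem split1_ne_nil (s : Char) (l : List Char) : split1 s l ≠ [] := by
  cases l with
  | nil => simp [split1]
  | cons c t =>
    simp only [split1]
    split_ifs
    · simp
    · cases h : split1 s t with
      | nil => exact absurd h (split1_ne_nil s t)
      | cons x xs => simp [mapHead]

theorem splitOn_go_single (s : Char) (fuel : Nat) (l cur : List Char)
    (acc : List (List Char)) (h : l.length < fuel) :
    PySem.Chars.splitOn.go [s] fuel l cur acc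
      = acc.reverse ++ mapHead (cur.reverse ++ ·) (split1 s l) := by
  induction l generalizing fuel cur acc with
  | nil =>
    cases fuel with
    | zero => omega
    | succ n => simp [PySem.Chars.splitOn.go, split1, mapHead]
  | cons c t ih =>
    cases fuel with
    | zero => omega
    | succ n =>
      simp only [PySem.Chars.splitOn.go]
      simp only [List.length_cons] at h
      by_cases hc : c = s
      · subst hc
        have hp : List.isPrefixOf [c] (c :: t) = true := by simp [List.isPrefixOf]
        rw [if_pos hp]
        simp only [List.length_cons, List.length_nil, List.drop_succ_cons, List.drop_zero]
        rw [ih n [] (cur.reverse :: acc) (by omega)]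
        cases hs : split1 c t with
        | nil => simp [split1, hs, mapHead]
        | cons x xs => simp [split1, hs, mapHead]
      · have hp : List.isPrefixOf [s] (c :: t) = false := by
          simp [List.isPrefixOf]
          exact fun h' => absurd h'.symm hc
        rw [if_neg (by simp [hp])]
        rw [ih n (c :: cur) acc (by omega)]
        simp only [split1, if_neg hc]
        cases hs : split1 s t with
        | nil => exact absurd hs (split1_ne_nil s t)
        | cons x xs => simp [mapHead]

theorem splitOn_single (s : Char) (l : List Char) :
    PySem.Chars.splitOn l [s] = split1 s l := by
  unfold PySem.Chars.splitOn
  rw [splitOn_go_single s (l.length + 1) l [] [] (by omega)]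
  cases h : split1 s l with
  | nil => exact absurd h (split1_ne_nil s l)
  | cons x xs => simp [mapHead]

theorem count_go_single (c : Char) (fuel : Nat) (l : List Char) (acc : Nat)
    (h : l.length ≤ fuel) :
    PySem.Chars.count.go [c] fuel l acc = acc + l.count c := by
  induction l generalizing fuel acc with
  | nil =>
    cases fuel with
    | zero => simp [PySem.Chars.count.go]
    | succ n => simp [PySem.Chars.count.go]
  | cons x t ih =>
    cases fuel with
    | zero => simp at h
    | succ n =>
      simp only [PySem.Chars.count.go]
      simp only [List.length_cons] at h
      by_cases hx : x = c
      · subst hx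
        have hp : List.isPrefixOf [x] (x :: t) = true := by simp [List.isPrefixOf]
        rw [if_pos hp]
        simp only [List.length_cons, List.length_nil, List.drop_succ_cons, List.drop_zero]
        rw [ih n (acc + 1) (by omega)]
        simp
        omega
      · have hp : List.isPrefixOf [c] (x :: t) = false := by
          simp [List.isPrefixOf]
          exact fun h' => absurd h'.symm hx
        rw [if_neg (by simp [hp])]
        rw [ih n acc (by omega)]
        simp [hx]

theorem count_single (c : Char) (l : List Char) :
    PySem.Chars.count l [c] = l.count c := by
  unfold PySem.Chars.count
  simp [count_go_single c l.length l 0 (le_refl _)]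

def runA : List Char → Int → Int × List Char
  | [], m => (m, [])
  | c :: t, m =>
    if c = '+' then runA t (m + 1)
    else if c = '.' then
      ((runA t m).1, Char.ofNat (PySem.Int.mod m 256).toNat :: (runA t m).2)
    else runA t m

def runB : List (List Char) → Int → Int × List (List Char)
  | [], m => (m, [])
  | seg :: r, m =>
    ((runB r (m + (seg.count '+' : Int))).1,
     [Char.ofNat (PySem.Int.mod (m + (seg.count '+' : Int)) 256).toNat]
       :: (runB r (m + (seg.count '+' : Int))).2)

theorem foldA_eq (l : List Char) (m : Int) (o : List Char) :
    l.foldl (fun (st : Int × List Char) command =>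
      if command = '+' then (st.1 + 1, st.2)
      else if command = '.' then (st.1, st.2 ++ [Char.ofNat (PySem.Int.mod st.1 256).toNat])
      else st) (m, o) = ((runA l m).1, o ++ (runA l m).2) := by
  induction l generalizing m o with
  | nil => simp [runA]
  | cons c t ih =>
    rw [List.foldl_cons]
    by_cases h1 : c = '+'
    · simp only [runA, if_pos h1]
      rw [ih]
    · by_cases h2 : c = '.'
      · simp only [runA, if_neg h1, if_pos h2]
        rw [ih]
        simp
      · simp only [runA, if_neg h1, if_neg h2]
        rw [ih]

theorem foldB_eq (segs : List (List Char)) (m : Int) (o : List (List Char)) :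
    segs.foldl (fun (st : Int × List (List Char)) seg =>
      let m := st.1 + (PySem.Chars.count seg ['+'] : Int)
      (m, st.2 ++ [[Char.ofNat (PySem.Int.mod m 256).toNat]])) (m, o)
      = ((runB segs m).1, o ++ (runB segs m).2) := by
  induction segs generalizing m o with
  | nil => simp [runB]
  | cons seg r ih =>
    rw [List.foldl_cons]
    show List.foldl _ (m + ((PySem.Chars.count seg ['+'] : Nat) : Int),
      o ++ [[Char.ofNat (PySem.Int.mod (m + ((PySem.Chars.count seg ['+'] : Nat) : Int)) 256).toNat]]) r = _
    rw [ih]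
    simp [runB, count_single]

theorem main_lemma (l : List Char) (m : Int) :
    (runA l m).2 = ((runB (split1 '.' l).dropLast m).2).flatten := by
  induction l generalizing m with
  | nil => simp [split1, runA, runB]
  | cons c t ih =>
    by_cases hc : c = '.'
    · subst hc
      cases hs : split1 '.' t with
      | nil => exact absurd hs (split1_ne_nil '.' t)
      | cons x xs =>
        have hdl : (([] : List Char) :: x :: xs).dropLast = [] :: (x :: xs).dropLast :=
          List.dropLast_cons_of_ne_nil (by simp)
        simp only [split1, runA, hs, hdl, reduceIte, Char.reduceEq]
        simp only [runB, List.count_nil, Nat.cast_zero, add_zero, List.flatten_cons]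
        rw [ih m, hs]
        simp
    · cases hs : split1 '.' t with
      | nil => exact absurd hs (split1_ne_nil '.' t)
      | cons x xs =>
        simp only [split1, if_neg hc, hs, mapHead]
        cases xs with
        | nil =>
          have ht : (split1 '.' t).dropLast = [] := by rw [hs]; rfl
          simp only [List.dropLast_singleton]
          by_cases h1 : c = '+'
          · subst h1
            rw [show runA ('+' :: t) m = runA t (m + 1) from by simp [runA]]
            rw [ih (m + 1), ht]; simp [runB]
          · rw [show runA (c :: t) m = runA t m from by simp [runA, h1, hc]]
            rw [ih m, ht]
        | cons y ys =>
          have h1 : ((c :: x) :: y :: ys).dropLast = (c :: x) :: (y :: ys).dropLast :=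
            List.dropLast_cons_of_ne_nil (by simp)
          have h2 : (x :: y :: ys).dropLast = x :: (y :: ys).dropLast :=
            List.dropLast_cons_of_ne_nil (by simp)
          rw [h1]
          by_cases hplus : c = '+'
          · subst hplus
            rw [show runA ('+' :: t) m = runA t (m + 1) from by simp [runA]]
            rw [ih (m + 1), hs, h2]
            simp only [runB, List.flatten_cons]
            have key : m + ((('+' :: x).count '+' : Nat) : Int)
                = m + 1 + ((x.count '+' : Nat) : Int) := by
              simp; ring
            rw [key]
          · rw [show runA (c :: t) m = runA t m from by simp [runA, hplus, hc]]
            rw [ih m, hs, h2]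
            simp only [runB, List.flatten_cons]
            have key : m + (((c :: x).count '+' : Nat) : Int)
                = m + ((x.count '+' : Nat) : Int) := by
              simp [hplus]
            rw [key]

theorem slice_neg_one (l : List (List Char)) :
    PySem.List.slice l none (some (-1)) = l.dropLast := by
  simp [PySem.List.slice, List.dropLast_eq_take]

theorem join_nil_flatten (parts : List (List Char)) :
    PySem.Chars.join [] parts = parts.flatten := by
  simp only [PySem.Chars.join, List.intercalate]
  induction parts with
  | nil => rfl
  | cons x xs ih =>
    cases xs with
    | nil => simp
    | cons y ys => simpa [List.intersperse] using ih

-- ===== VERDICT (by name: the statement is the Claim_ definition above) =====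
theorem my_first_interpreter_spec : Claim_equal_my_first_interpreter := by
  intro code _
  unfold Spec_my_first_interpreter my_first_interpreter my_first_interpreter_alt
  simp only [foldA_eq, foldB_eq, slice_neg_one, splitOn_single, join_nil_flatten,
    List.nil_append]
  rw [main_lemma]
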